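-- pv_equiv track=rewrite | github.com/KILKA1001/bebrobot | bot/services/ai_service.py | _is_temporary_upstream_rate_limited
-- ===== SOURCE A (Python) =====
-- def _is_temporary_upstream_rate_limited(body: str) -> bool:
--     normalized = (body or "").lower()
--     if not normalized:
--         return False
--     return any(
--         marker in normalized
--         for marker in (
--             "temporarily rate-limited upstream",
--             "retry shortly",
--             "provider returned error",
--             "rate limit at provider",
--             "upstream rate limit",
--         )
--     )
-- ===== SOURCE B (Python) =====
-- MARKERS = (
--     "temporarily rate-limited upstream",
--     "retry shortly",
--     "provider returned error",
--     "rate limit at provider",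
--     "upstream rate limit",
-- )
--
-- def _is_temporary_upstream_rate_limited(body: str) -> bool:
--     s = (body or "").lower()
--     for i in range(len(s)):
--         if any(s.startswith(m, i) for m in MARKERS):
--             return True
--     return False
-- ===== Notes on version B (the rewrite author's own statement) =====
-- stated objective: alternative
-- what changed: Five independent substring scans (any(marker in s)) are replaced by one left-to-right pass over the body that checks at each position whether any marker starts there (startswith with offset), so the text is traversed once.
import Mathlib
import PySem

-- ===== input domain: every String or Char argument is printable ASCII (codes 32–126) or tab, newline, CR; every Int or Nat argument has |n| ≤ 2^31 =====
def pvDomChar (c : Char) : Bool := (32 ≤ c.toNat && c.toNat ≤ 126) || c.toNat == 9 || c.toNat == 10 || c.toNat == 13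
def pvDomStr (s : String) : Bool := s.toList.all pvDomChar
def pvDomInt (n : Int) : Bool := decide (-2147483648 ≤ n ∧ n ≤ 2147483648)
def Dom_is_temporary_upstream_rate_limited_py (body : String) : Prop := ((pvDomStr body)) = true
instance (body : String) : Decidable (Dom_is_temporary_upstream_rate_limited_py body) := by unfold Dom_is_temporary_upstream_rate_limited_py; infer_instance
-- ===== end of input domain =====

-- B replaces five independent substring scans with a single left-to-right pass that
-- checks at each position whether any marker starts there (alternative decomposition, same cost).


-- ===== PORT A =====
-- the tuple of marker strings A iterates over
def pvMarkers : List String :=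
  ["temporarily rate-limited upstream", "retry shortly", "provider returned error",
   "rate limit at provider", "upstream rate limit"]

def is_temporary_upstream_rate_limited_py (body : String) : Bool :=
  let normalized := PySem.Str.lower body   -- (body or "").lower(): for a String, body or "" = body
  if normalized.toList = [] then false     -- if not normalized: return False
  else pvMarkers.any (fun marker => PySem.Str.isIn marker normalized)

-- ===== PORT B =====
-- B's scan: at each position of the lowered body, does some marker start here? (s.startswith(m, i))
def pvScan (s : List Char) : Bool :=
  match s with
  | [] => false
  | _ :: rest => pvMarkers.any (fun m => m.toList.isPrefixOf s) || pvScan rest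

def is_temporary_upstream_rate_limited_py_alt (body : String) : Bool :=
  pvScan (PySem.Chars.lower body.toList)

-- ===== PRECONDITION & SPEC =====
def Spec_is_temporary_upstream_rate_limited_py (body : String) (out : Bool) : Prop := out = is_temporary_upstream_rate_limited_py_alt body
instance (body : String) (out : Bool) : Decidable (Spec_is_temporary_upstream_rate_limited_py body out) := by unfold Spec_is_temporary_upstream_rate_limited_py; infer_instance

-- ===== CLAIM (what is proved, stated in full; the proofs are below) =====
def Claim_equal_is_temporary_upstream_rate_limited_py : Prop := ∀ (body : String), Dom_is_temporary_upstream_rate_limited_py body → Spec_is_temporary_upstream_rate_limited_py body (is_temporary_upstream_rate_limited_py body)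

-- ===== LEMMAS AND PROOFS =====

-- B's one-pass scan finds exactly the strings that occur as an infix (markers are all nonempty)
theorem pvScan_iff (s : List Char) :
    pvScan s = true ↔ ∃ m ∈ pvMarkers, m.toList <:+: s := by
  induction s with
  | nil =>
    simp only [pvScan]
    constructor
    · intro h; cases h
    rintro ⟨m, hm, hinf⟩
    have : m.toList = [] := List.eq_nil_of_infix_nil hinf
    fin_cases hm <;> simp_all
  | cons c rest ih =>
    simp only [pvScan, Bool.or_eq_true, List.any_eq_true, ih]
    constructor
    · rintro (⟨m, hm, hp⟩ | ⟨m, hm, hi⟩)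
      · exact ⟨m, hm, (List.isPrefixOf_iff_prefix.mp hp).isInfix⟩
      · exact ⟨m, hm, List.infix_cons hi⟩
    · rintro ⟨m, hm, hi⟩
      rcases List.infix_cons_iff.mp hi with hp | hi'
      · exact Or.inl ⟨m, hm, List.isPrefixOf_iff_prefix.mpr hp⟩
      · exact Or.inr ⟨m, hm, hi'⟩

-- ===== VERDICT (by name: the statement is the Claim_ definition above) =====
theorem is_temporary_upstream_rate_limited_py_spec : Claim_equal_is_temporary_upstream_rate_limited_py := by
  intro body _
  unfold Spec_is_temporary_upstream_rate_limited_py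
  unfold is_temporary_upstream_rate_limited_py is_temporary_upstream_rate_limited_py_alt
  simp only
  by_cases h : (PySem.Str.lower body).toList = []
  · -- empty lowered body: the scan is over the empty list too
    have h' : PySem.Chars.lower body.toList = [] := by
      simpa [PySem.Str.lower] using h
    simp [h, h', pvScan]
  · rw [if_neg h]
    have h' : (PySem.Str.lower body).toList = PySem.Chars.lower body.toList := by
      simp [PySem.Str.lower]
    rw [Bool.eq_iff_iff]
    simp only [List.any_eq_true, pvScan_iff, ← h']
    constructor
    · rintro ⟨m, hm, hin⟩
      exact ⟨m, hm, (PySem.Chars.isIn_iff_infix _ _).mp (by simpa [PySem.Str.isIn] using hin)⟩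
    · rintro ⟨m, hm, hi⟩
      exact ⟨m, hm, by simpa [PySem.Str.isIn] using (PySem.Chars.isIn_iff_infix _ _).mpr hi⟩
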